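-- pv_equiv track=rewrite | github.com/paintingburritos/AOC-2021 | Day07/Day07.py | part1
-- ===== SOURCE A (Python) =====
-- def part1(posistions):
--   maxValue = max(posistions)
--   fuels = []
--
--   for i in range(maxValue + 1):
--     tempSum = 0
--     for e in posistions:
--       tempSum += abs(i-e)
--     fuels.append(tempSum)
--   return fuels
-- ===== SOURCE B (Python) =====
-- def part1(posistions):
--     m = max(posistions)
--     n = len(posistions)
--     cnt = {}
--     for e in posistions:
--         cnt[e] = cnt.get(e, 0) + 1
--     cur = 0
--     k = 0
--     for e in posistions:
--         cur += abs(e)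
--         if e < 0:
--             k += 1
--     fuels = []
--     for i in range(m + 1):
--         fuels.append(cur)
--         k += cnt.get(i, 0)
--         cur += 2 * k - n
--     return fuels
-- ===== Notes on version B (the rewrite author's own statement) =====
-- stated objective: faster
-- what changed: Instead of re-summing |i-e| over the whole list for every target i, B builds a Counter of positions once, computes the fuel at target 0 directly, and then sweeps i upward updating the fuel incrementally by f(i+1) = f(i) + 2*count(e <= i) - n.
-- outside the precondition, e.g. on part1([]): A raises ValueError, B raises ValueError
import Mathlib
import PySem

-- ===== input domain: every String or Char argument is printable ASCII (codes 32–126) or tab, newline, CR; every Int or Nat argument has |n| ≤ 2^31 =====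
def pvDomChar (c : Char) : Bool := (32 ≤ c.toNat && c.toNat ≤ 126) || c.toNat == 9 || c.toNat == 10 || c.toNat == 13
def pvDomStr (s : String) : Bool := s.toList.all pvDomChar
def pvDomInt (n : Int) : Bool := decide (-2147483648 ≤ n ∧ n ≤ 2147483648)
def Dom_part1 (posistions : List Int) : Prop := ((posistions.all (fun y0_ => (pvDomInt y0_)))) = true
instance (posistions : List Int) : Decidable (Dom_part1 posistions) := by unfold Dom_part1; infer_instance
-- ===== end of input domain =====

-- B replaces A's per-target rescan of the whole list by a single Counter pass plus an
-- incremental sweep over targets (objective: faster).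

-- ===== PORT A =====
def part1 (posistions : List Int) : List Int :=
  match PySem.List.max? posistions (fun x => x) with
  | none => []
  | some maxValue =>
    (PySem.List.pyRange 0 (maxValue + 1) 1).foldl
      (fun fuels i =>
        fuels ++ [posistions.foldl (fun tempSum e => tempSum + |i - e|) 0]) []

-- ===== PORT B =====
def part1_alt (posistions : List Int) : List Int :=
  match PySem.List.max? posistions (fun x => x) with
  | none => []
  | some m =>
    let n : Int := posistions.length
    let cnt := posistions.foldl (fun d e => d.modify e 0 (· + 1))
      (PySem.Dict.empty : PySem.Dict Int Int)
    let ck := posistions.foldl (fun (p : Int × Int) e =>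
        (p.1 + |e|, if e < 0 then p.2 + 1 else p.2)) (0, 0)
    ((PySem.List.pyRange 0 (m + 1) 1).foldl
      (fun (st : List Int × Int × Int) i =>
        let k := st.2.2 + cnt.getD i 0
        (st.1 ++ [st.2.1], st.2.1 + 2 * k - n, k))
      ([], ck.1, ck.2)).1

-- ===== PRECONDITION & SPEC =====
-- Python's max([]) raises ValueError (in both A and B), so the empty list is excluded.
def Pre_part1 (posistions : List Int) : Prop := posistions ≠ []
instance (posistions : List Int) : Decidable (Pre_part1 posistions) := by unfold Pre_part1; infer_instance
def pvWitness_part1 : List Int := [0, 3, -2, 3, 7]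

def Spec_part1 (posistions : List Int) (out : List Int) : Prop := out = part1_alt posistions
instance (posistions : List Int) (out : List Int) : Decidable (Spec_part1 posistions out) := by unfold Spec_part1; infer_instance

-- ===== CLAIM (what is proved, stated in full; the proofs are below) =====
def Claim_equal_part1 : Prop := ∀ (posistions : List Int), Dom_part1 posistions → Pre_part1 posistions → Spec_part1 posistions (part1 posistions)

-- ===== LEMMAS AND PROOFS =====

-- abbreviations for the two quantities the sweep maintains
def pvF (l : List Int) (i : Int) : Int := (l.map (fun e => |i - e|)).sum
def pvC (l : List Int) (i : Int) : Int := (l.countP (fun e => decide (e ≤ i)) : Int)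

lemma abs_succ_sub (i e : Int) : |i + 1 - e| = |i - e| + (if e ≤ i then (1 : Int) else -1) := by
  by_cases h : e ≤ i
  · rw [abs_of_nonneg (by omega), abs_of_nonneg (by omega), if_pos h]
    ring
  · rw [abs_of_nonpos (by omega), abs_of_nonpos (by omega), if_neg h]
    omega

lemma pvF_step (l : List Int) (i : Int) :
    pvF l (i + 1) = pvF l i + 2 * pvC l i - l.length := by
  induction l with
  | nil => simp [pvF, pvC]
  | cons e t ih =>
    simp only [pvF, pvC, List.map_cons, List.sum_cons, List.countP_cons, List.length_cons] at *
    rw [abs_succ_sub]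
    by_cases h : e ≤ i
    · simp only [h, if_pos, decide_true]
      push_cast
      omega
    · simp only [h, if_neg, not_false_iff, decide_false]
      push_cast at *
      omega

lemma pvC_step_nat (l : List Int) (i : Int) :
    l.countP (fun e => decide (e ≤ i))
      = l.countP (fun e => decide (e ≤ i - 1)) + l.count i := by
  induction l with
  | nil => simp
  | cons e t ih =>
    simp only [List.countP_cons, List.count_cons, ih]
    by_cases h1 : e ≤ i <;> by_cases h2 : e ≤ i - 1 <;> by_cases h3 : e = i <;>
      simp [h1, h2, h3] <;> omega

lemma pvC_step (l : List Int) (i : Int) :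
    pvC l i = pvC l (i - 1) + (l.count i : Int) := by
  unfold pvC
  rw [pvC_step_nat l i]
  push_cast
  ring

lemma pair_fold (l : List Int) : ∀ (c k : Int),
    l.foldl (fun (p : Int × Int) e =>
        (p.1 + |e|, if e < 0 then p.2 + 1 else p.2)) (c, k)
      = (c + (l.map (fun e => |e|)).sum, k + (l.countP (fun e => decide (e < 0)) : Int)) := by
  induction l with
  | nil => intro c k; simp
  | cons e t ih =>
    intro c k
    simp only [List.foldl_cons, List.map_cons, List.sum_cons, List.countP_cons]
    rw [ih]
    by_cases h : e < 0
    · simp [h]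
      constructor
      · ring
      · ring
    · simp [h]
      ring

lemma loop_eq (l : List Int) (n : Int) (hn : n = l.length)
    (cnt : PySem.Dict Int Int) (hcnt : ∀ i, cnt.getD i 0 = (l.count i : Int)) :
    ∀ (N : ℕ) (a : Int) (fuels : List Int) (cur k : Int),
    cur = pvF l a → k = pvC l (a - 1) →
    (PySem.List.pyRange a (a + N) 1).foldl
      (fun fuels i =>
        fuels ++ [l.foldl (fun tempSum e => tempSum + |i - e|) 0]) fuels
    = ((PySem.List.pyRange a (a + N) 1).foldl
      (fun (st : List Int × Int × Int) i =>
        let k := st.2.2 + cnt.getD i 0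
        (st.1 ++ [st.2.1], st.2.1 + 2 * k - n, k))
      (fuels, cur, k)).1 := by
  intro N
  induction N with
  | zero =>
    intro a fuels cur k _ _
    rw [PySem.List.pyRange_one_eq_nil (by push_cast; omega)]
    simp
  | succ N ih =>
    intro a fuels cur k hcur hk
    rw [PySem.List.pyRange_one_cons (by push_cast; omega)]
    simp only [List.foldl_cons]
    have hrange : a + ((N : Int) + 1) = (a + 1) + (N : Int) := by ring
    push_cast
    rw [hrange]
    have hsum : l.foldl (fun tempSum e => tempSum + |a - e|) 0 = cur := by
      rw [PySem.List.foldl_add (g := fun e => |a - e|)]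
      simp [hcur, pvF]
    have hk' : k + cnt.getD a 0 = pvC l a := by
      rw [hcnt, hk, ← pvC_step]
    have hcur' : cur + 2 * (k + cnt.getD a 0) - n = pvF l (a + 1) := by
      rw [hk', hcur, hn, pvF_step]
    rw [hsum]
    exact ih (a + 1) (fuels ++ [cur]) _ _ hcur' (by rw [hk']; norm_num)

theorem part1_eq_alt (posistions : List Int) (hpre : posistions ≠ []) :
    part1 posistions = part1_alt posistions := by
  unfold part1 part1_alt
  cases hmax : PySem.List.max? posistions (fun x => x) with
  | none =>
    exact absurd ((PySem.List.max?_eq_none_iff posistions (fun x => x)).mp hmax) hpre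
  | some m =>
    simp only
    rw [pair_fold]
    by_cases h : m + 1 ≤ 0
    · rw [PySem.List.pyRange_one_eq_nil h]
      simp
    · have h : (0:Int) < m + 1 := by omega
      have hN : m + 1 = (0 : Int) + ((m + 1).toNat : Int) := by
        rw [Int.toNat_of_nonneg (by omega)]; ring
      rw [hN]
      refine loop_eq posistions _ rfl _ (fun i => ?_) (m + 1).toNat 0 [] _ _ ?_ ?_
      · rw [PySem.Dict.getD_foldl_modify_add_one]
        simp [PySem.Dict.getD]
      · simp only [pvF, zero_add]
        congr 1
        apply List.map_congr_left
        intro e _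
        rw [zero_sub, abs_neg]
      · simp only [pvC, zero_add, zero_sub]
        congr 2
        funext e
        rw [decide_eq_decide]
        omega

-- ===== VERDICT (by name: the statement is the Claim_ definition above) =====
theorem part1_spec : Claim_equal_part1 := by
  intro posistions _ hpre
  exact part1_eq_alt posistions hpre
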